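-- pv_equiv track=rewrite | github.com/jasondavies/rectangle-free | 3xn.py | rectfree_3xn_k
-- ===== SOURCE A (Python) =====
-- def falling(n, m):
--     p = 1
--     for i in range(m):
--         p *= (n - i)
--     return p
--
-- def poly_mul(a, b):
--     out = [0] * (len(a) + len(b) - 1)
--     for i, ai in enumerate(a):
--         for j, bj in enumerate(b):
--             out[i + j] += ai * bj
--     return out
--
-- def poly_pow(p, k):
--     out = [1]
--     base = p[:]
--     e = k
--     while e:
--         if e & 1:
--             out = poly_mul(out, base)
--         e >>= 1
--         if e:
--             base = poly_mul(base, base)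
--     return out
--
-- def rectfree_3xn_k(n: int, k: int) -> int:
--     if n < 0 or k < 0:
--         return 0
--     # g_k(x) = 1 + (1+3(k-1)) x + 3(k-1)^2 x^2 + (k-1)^3 x^3
--     km1 = k - 1
--     g = [1,
--          1 + 3*km1,
--          3*(km1**2),
--          (km1**3)]
--     # G_k(x) = g^k, coefficients s_m
--     s = poly_pow(g, k)
--
--     A = k*(k-1)*(k-2)  # free columns
--     total = 0
--     for m in range(min(len(s)-1, n) + 1):
--         total += s[m] * falling(n, m) * (A ** (n - m))
--     return total
-- ===== SOURCE B (Python) =====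
-- def falling(n, m):
--     p = 1
--     for i in range(m):
--         p *= (n - i)
--     return p
--
-- def rectfree_3xn_k(n: int, k: int) -> int:
--     if n < 0 or k < 0:
--         return 0
--     # g_k(x) = 1 + (1+3(k-1)) x + 3(k-1)^2 x^2 + (k-1)^3 x^3
--     c = k - 1
--     g = [1, 1 + 3*c, 3*c*c, c*c*c]
--     # we only need the coefficients of g^k up to degree M = min(3k, n):
--     # build them by k successive multiplications by g, truncated at degree M.
--     M = min(3*k, n)
--     s = [1]
--     for _ in range(k):
--         s = [sum(g[d] * s[m - d] for d in range(4) if 0 <= m - d < len(s))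
--              for m in range(min(M, len(s) + 2) + 1)]
--     A = k*(k-1)*(k-2)
--     total = 0
--     f = 1  # falling(n, m), maintained incrementally
--     for m in range(M + 1):
--         total += s[m] * f * A**(n - m)
--         f *= n - m
--     return total
-- ===== Notes on version B (the rewrite author's own statement) =====
-- stated objective: faster
-- what changed: Replaces binary exponentiation of the full degree-3k polynomial with k successive multiplications by the fixed cubic g, truncated at degree min(3k,n) (only those coefficients enter the answer), and maintains the falling factorial incrementally; intended as faster (a timing run measured ~6-9x at its larger sizes with A timing out, but could not confirm it to its threshold).
import Mathlib
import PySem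

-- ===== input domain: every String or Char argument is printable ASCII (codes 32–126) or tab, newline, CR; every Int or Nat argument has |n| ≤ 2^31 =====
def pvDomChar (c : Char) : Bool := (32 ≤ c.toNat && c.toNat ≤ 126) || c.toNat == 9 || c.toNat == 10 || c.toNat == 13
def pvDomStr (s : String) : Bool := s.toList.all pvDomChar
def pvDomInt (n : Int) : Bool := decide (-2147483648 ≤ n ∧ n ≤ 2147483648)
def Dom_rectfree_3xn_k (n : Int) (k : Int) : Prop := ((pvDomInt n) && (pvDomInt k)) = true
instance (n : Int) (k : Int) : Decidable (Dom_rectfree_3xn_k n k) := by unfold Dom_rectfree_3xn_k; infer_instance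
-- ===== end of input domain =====

-- B replaces A's binary exponentiation of the full degree-3k polynomial by k successive
-- multiplications by the fixed cubic, truncated at degree min(3k, n) (the only coefficients
-- the answer uses), and maintains the falling factorial incrementally. Intended as faster; the
-- timing run read ~6-9x at its larger sizes (A timing out on some inputs) but could not confirm it.

-- ===== PORT A =====

-- falling(n, m)
def falling (n : Int) (m : Int) : Int :=
  (PySem.List.pyRange 0 m 1).foldl (fun p i => p * (n - i)) 1

-- inner loop of poly_mul: "for j, bj in enumerate(b): out[i+j] += ai * bj"
-- (the index i+j is always within out, see pmRow_length/poly_mul; Python's in-range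
--  item assignment is List.set, its in-range read is getD)
def pmRow (out : List Int) (i : Nat) (ai : Int) (b : List Int) (j : Nat) : List Int :=
  match b with
  | [] => out
  | bj :: rest => pmRow (out.set (i + j) (out.getD (i + j) 0 + ai * bj)) i ai rest (j + 1)

-- outer loop of poly_mul: "for i, ai in enumerate(a): ..."
def pmOuter (out : List Int) (a : List Int) (b : List Int) (i : Nat) : List Int :=
  match a with
  | [] => out
  | ai :: rest => pmOuter (pmRow out i ai b 0) rest b (i + 1)

def poly_mul (a b : List Int) : List Int :=
  pmOuter (List.replicate (a.length + b.length - 1) 0) a b 0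

-- "while e: if e & 1: out = poly_mul(out, base); e >>= 1; if e: base = poly_mul(base, base)"
-- poly_pow is only called with k ≥ 0, so the loop variable is a Nat: e & 1 = e % 2, e >> 1 = e / 2.
def poly_pow_loop (out base : List Int) (e : Nat) : List Int :=
  if e = 0 then out
  else
    let out' := if e % 2 = 1 then poly_mul out base else out
    let e' := e / 2
    let base' := if e' ≠ 0 then poly_mul base base else base
    poly_pow_loop out' base' e'
termination_by e
decreasing_by omega

def poly_pow (p : List Int) (k : Int) : List Int := poly_pow_loop [1] p k.toNat

def rectfree_3xn_k (n : Int) (k : Int) : Int :=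
  if n < 0 ∨ k < 0 then 0
  else
    let km1 := k - 1
    let g : List Int := [1, 1 + 3 * km1, 3 * (km1 ^ 2), km1 ^ 3]
    let s := poly_pow g k
    let A := k * (k - 1) * (k - 2)
    -- s[m] is always in range (m ≤ len(s)-1); the exponent n - m is ≥ 0 (m ≤ n), so ** is ^ on toNat
    (PySem.List.pyRange 0 (min ((s.length : Int) - 1) n + 1) 1).foldl
      (fun total m => total + PySem.List.pyGetD s m 0 * falling n m * A ^ (n - m).toNat) 0

-- ===== PORT B =====

-- "sum(g[d] * s[m - d] for d in range(4) if 0 <= m - d < len(s))"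
def bRow (g s : List Int) (m : Nat) : Int :=
  (List.range 4).foldl
    (fun acc d => if d ≤ m ∧ m - d < s.length then acc + g.getD d 0 * s.getD (m - d) 0 else acc) 0

-- "s = [ ... for m in range(min(M, len(s) + 2) + 1)]"
def bStep (g s : List Int) (M : Nat) : List Int :=
  (List.range (min M (s.length + 2) + 1)).map (fun m => bRow g s m)

-- "for _ in range(k): s = ..."
def bPow (g : List Int) (M : Nat) (k : Nat) : List Int :=
  (List.range k).foldl (fun s _ => bStep g s M) [1]

def rectfree_3xn_k_alt (n : Int) (k : Int) : Int :=
  if n < 0 ∨ k < 0 then 0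
  else
    let c := k - 1
    let g : List Int := [1, 1 + 3 * c, 3 * c * c, c * c * c]
    let M := min (3 * k) n   -- ≥ 0 here
    let s := bPow g M.toNat k.toNat
    let A := k * (k - 1) * (k - 2)
    -- loop over m in range(M+1), carrying (total, f) with f = falling(n, m); n - m ≥ 0 throughout
    ((List.range (M.toNat + 1)).foldl
      (fun (tf : Int × Int) m =>
        (tf.1 + s.getD m 0 * tf.2 * A ^ (n - (m : Int)).toNat, tf.2 * (n - (m : Int)))) (0, 1)).1

-- ===== PRECONDITION & SPEC =====
def Spec_rectfree_3xn_k (n : Int) (k : Int) (out : Int) : Prop := out = rectfree_3xn_k_alt n k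
instance (n : Int) (k : Int) (out : Int) : Decidable (Spec_rectfree_3xn_k n k out) := by unfold Spec_rectfree_3xn_k; infer_instance

-- ===== CLAIM (what is proved, stated in full; the proofs are below) =====
def Claim_equal_rectfree_3xn_k : Prop := ∀ (n : Int) (k : Int), Dom_rectfree_3xn_k n k → Spec_rectfree_3xn_k n k (rectfree_3xn_k n k)

-- ===== LEMMAS AND PROOFS =====

theorem pmRow_length (out : List Int) (i : Nat) (ai : Int) (b : List Int) (j : Nat) :
    (pmRow out i ai b j).length = out.length := by
  induction b generalizing out j with
  | nil => rfl
  | cons bj rest ih => rw [pmRow, ih, List.length_set]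

theorem pmOuter_length (out : List Int) (a b : List Int) (i : Nat) :
    (pmOuter out a b i).length = out.length := by
  induction a generalizing out i with
  | nil => rfl
  | cons ai rest ih => rw [pmOuter, ih, pmRow_length]

theorem length_poly_mul (a b : List Int) :
    (poly_mul a b).length = a.length + b.length - 1 := by
  rw [poly_mul, pmOuter_length, List.length_replicate]

theorem getD_set_dist (l : List Int) (i : Nat) (v : Int) (m : Nat) (hi : i < l.length) :
    (l.set i v).getD m 0 = if m = i then v else l.getD m 0 := by
  by_cases h : m = i
  · subst h; simp [List.getD, List.getElem?_set_self (by omega)]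
  · simp [List.getD, List.getElem?_set_ne (by omega : i ≠ m), h]

theorem pmRow_getD (out : List Int) (i : Nat) (ai : Int) (b : List Int) (j : Nat)
    (h : i + j + b.length ≤ out.length) (m : Nat) :
    (pmRow out i ai b j).getD m 0 =
      out.getD m 0 + (if i + j ≤ m ∧ m - (i + j) < b.length then ai * b.getD (m - (i + j)) 0 else 0) := by
  induction b generalizing out j with
  | nil => simp [pmRow]
  | cons bj rest ih =>
    have hlen : i + j + rest.length + 1 ≤ out.length := by
      simpa [Nat.add_comm, Nat.add_assoc, Nat.add_left_comm] using h
    rw [pmRow, ih _ (j+1) (by rw [List.length_set]; omega)]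
    rw [getD_set_dist out (i+j) _ m (by omega)]
    by_cases hm : m = i + j
    · subst hm
      rw [if_pos rfl, if_neg (by omega), if_pos (by simp)]
      simp
    · rw [if_neg hm]
      by_cases h1 : i + j + 1 ≤ m ∧ m - (i + j + 1) < rest.length
      · rw [if_pos (by omega : i + (j+1) ≤ m ∧ m - (i + (j+1)) < rest.length)]
        rw [if_pos (by simp; omega : i + j ≤ m ∧ m - (i + j) < (bj :: rest).length)]
        have h2 : m - (i + j) = (m - (i + (j+1))) + 1 := by omega
        rw [h2]
        simp
      · rw [if_neg (by omega : ¬(i + (j+1) ≤ m ∧ m - (i + (j+1)) < rest.length))]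
        rw [if_neg (by simp; omega : ¬(i + j ≤ m ∧ m - (i + j) < (bj :: rest).length))]

theorem pmOuter_getD (out : List Int) (a b : List Int) (i : Nat)
    (h : i + a.length + b.length ≤ out.length + 1) (m : Nat) :
    (pmOuter out a b i).getD m 0 =
      out.getD m 0 + ∑ t ∈ Finset.range a.length,
        (if i + t ≤ m ∧ m - (i + t) < b.length then a.getD t 0 * b.getD (m - (i + t)) 0 else 0) := by
  induction a generalizing out i with
  | nil => simp [pmOuter]
  | cons ai rest ih =>
    rw [pmOuter, ih _ (i+1) (by rw [pmRow_length]; simp at h; omega)]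
    rw [pmRow_getD out i ai b 0 (by simp at h ⊢; omega) m]
    rw [List.length_cons, Finset.sum_range_succ']
    simp only [List.getD_cons_succ, List.getD_cons_zero, Nat.add_zero]
    have : ∀ t ∈ Finset.range rest.length,
        (if i + 1 + t ≤ m ∧ m - (i + 1 + t) < b.length then rest.getD t 0 * b.getD (m - (i + 1 + t)) 0 else 0)
        = (if i + (t + 1) ≤ m ∧ m - (i + (t + 1)) < b.length then rest.getD t 0 * b.getD (m - (i + (t + 1))) 0 else 0) := by
      intro t _
      have e : i + 1 + t = i + (t + 1) := by omega
      rw [e]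
    rw [Finset.sum_congr rfl this]
    ring

theorem poly_mul_getD (a b : List Int) (ha : a ≠ []) (hb : b ≠ []) (m : Nat) :
    (poly_mul a b).getD m 0 = ∑ i ∈ Finset.range (m + 1), a.getD i 0 * b.getD (m - i) 0 := by
  have hla : 1 ≤ a.length := List.length_pos_iff.mpr ha
  have hlb : 1 ≤ b.length := List.length_pos_iff.mpr hb
  rw [poly_mul, pmOuter_getD _ _ _ 0 (by rw [List.length_replicate]; omega) m]
  have hrep : (List.replicate (a.length + b.length - 1) (0:Int)).getD m 0 = 0 := by
    by_cases h : m < a.length + b.length - 1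
    · rw [List.getD_eq_getElem _ _ (by simpa using h)]; simp
    · rw [List.getD_eq_default _ _ (by simpa using h)]
  rw [hrep, zero_add]
  have l1 : ∀ t ∈ Finset.range a.length,
      (if 0 + t ≤ m ∧ m - (0 + t) < b.length then a.getD t 0 * b.getD (m - (0 + t)) 0 else 0)
      = (if t ≤ m then a.getD t 0 * b.getD (m - t) 0 else 0) := by
    intro t _
    simp only [Nat.zero_add]
    by_cases h1 : t ≤ m
    · by_cases h2 : m - t < b.length
      · rw [if_pos ⟨h1, h2⟩, if_pos h1]
      · rw [if_neg (by tauto), if_pos h1, List.getD_eq_default b 0 (by omega), mul_zero]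
    · rw [if_neg (by tauto), if_neg h1]
  rw [Finset.sum_congr rfl l1]
  have l2 : ∀ t ∈ Finset.range (m+1),
      a.getD t 0 * b.getD (m - t) 0 = (if t ≤ m then a.getD t 0 * b.getD (m - t) 0 else 0) := by
    intro t ht
    rw [if_pos (by simp at ht; omega)]
  rw [Finset.sum_congr rfl l2]
  have ext1 : ∑ t ∈ Finset.range a.length, (if t ≤ m then a.getD t 0 * b.getD (m - t) 0 else 0)
      = ∑ t ∈ Finset.range (max a.length (m+1)), (if t ≤ m then a.getD t 0 * b.getD (m - t) 0 else 0) := by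
    apply Finset.sum_subset (by intro x hx; simp only [Finset.mem_range] at hx ⊢; omega)
    intro x _ hx
    simp only [Finset.mem_range, not_lt] at hx
    by_cases h1 : x ≤ m
    · rw [if_pos h1, List.getD_eq_default a 0 (by omega), zero_mul]
    · rw [if_neg h1]
  have ext2 : ∑ t ∈ Finset.range (m+1), (if t ≤ m then a.getD t 0 * b.getD (m - t) 0 else 0)
      = ∑ t ∈ Finset.range (max a.length (m+1)), (if t ≤ m then a.getD t 0 * b.getD (m - t) 0 else 0) := by
    apply Finset.sum_subset (by intro x hx; simp only [Finset.mem_range] at hx ⊢; omega)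
    intro x _ hx
    simp only [Finset.mem_range, not_lt] at hx
    rw [if_neg (by omega)]
  rw [ext1, ext2]

noncomputable def toPoly (l : List Int) : Polynomial ℤ :=
  ∑ i ∈ Finset.range l.length, Polynomial.C (l.getD i 0) * Polynomial.X ^ i

theorem coeff_toPoly (l : List Int) (m : Nat) : (toPoly l).coeff m = l.getD m 0 := by
  unfold toPoly
  rw [Polynomial.finset_sum_coeff]
  simp only [Polynomial.coeff_C_mul, Polynomial.coeff_X_pow, mul_ite, mul_one, mul_zero]
  rw [Finset.sum_ite_eq (Finset.range l.length) m (fun i => l.getD i 0)]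
  by_cases h : m < l.length
  · rw [if_pos (by simpa using h)]
  · rw [if_neg (by simpa using h), List.getD_eq_default l 0 (by omega : l.length ≤ m)]

theorem poly_mul_ne_nil (a b : List Int) (ha : a ≠ []) (hb : b ≠ []) : poly_mul a b ≠ [] := by
  have hla : 1 ≤ a.length := List.length_pos_iff.mpr ha
  have hlb : 1 ≤ b.length := List.length_pos_iff.mpr hb
  have := length_poly_mul a b
  intro hc
  rw [hc] at this
  simp at this
  omega

theorem toPoly_mul (a b : List Int) (ha : a ≠ []) (hb : b ≠ []) :
    toPoly (poly_mul a b) = toPoly a * toPoly b := by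
  apply Polynomial.ext
  intro m
  rw [coeff_toPoly, Polynomial.coeff_mul, poly_mul_getD a b ha hb m,
    Finset.Nat.sum_antidiagonal_eq_sum_range_succ_mk]
  simp only [coeff_toPoly]

theorem poly_pow_loop_step (out base : List Int) (e : Nat) (he : ¬ e = 0) :
    poly_pow_loop out base e =
      poly_pow_loop (if e % 2 = 1 then poly_mul out base else out)
        (if e / 2 ≠ 0 then poly_mul base base else base) (e / 2) := by
  conv_lhs => rw [poly_pow_loop]
  rw [if_neg he]

theorem poly_pow_loop_length (out base : List Int) (e : Nat) (ho : out ≠ []) (hb : base ≠ []) :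
    (poly_pow_loop out base e).length = out.length + (base.length - 1) * e := by
  induction e using Nat.strong_induction_on generalizing out base with
  | _ e ih =>
    by_cases he : e = 0
    · subst he; rw [poly_pow_loop]; simp
    · have hlo : 1 ≤ out.length := List.length_pos_iff.mpr ho
      have hlb : 1 ≤ base.length := List.length_pos_iff.mpr hb
      obtain ⟨d, hd⟩ : ∃ d, base.length = d + 1 := ⟨base.length - 1, by omega⟩
      rw [poly_pow_loop_step out base e he]
      by_cases he2 : e / 2 = 0
      · have he1 : e = 1 := by omega
        subst he1
        norm_num
        rw [poly_pow_loop]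
        simp [length_poly_mul]
        omega
      · rw [if_pos (he2 : e / 2 ≠ 0)]
        by_cases hodd : e % 2 = 1
        · rw [if_pos hodd,
            ih (e/2) (by omega) _ _ (poly_mul_ne_nil _ _ ho hb) (poly_mul_ne_nil _ _ hb hb),
            length_poly_mul, length_poly_mul]
          rw [hd]
          have h2 : out.length + (d + 1) - 1 = out.length + d := by omega
          have h3 : d + 1 + (d + 1) - 1 - 1 = 2 * d := by omega
          rw [h2, h3]
          set q := e / 2 with hq
          have h1 : e = 2 * q + 1 := by omega
          rw [h1]
          simp only [Nat.add_sub_cancel]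
          ring
        · rw [if_neg hodd,
            ih (e/2) (by omega) _ _ ho (poly_mul_ne_nil _ _ hb hb), length_poly_mul]
          rw [hd]
          have h3 : d + 1 + (d + 1) - 1 - 1 = 2 * d := by omega
          rw [h3]
          set q := e / 2 with hq
          have h1 : e = 2 * q := by omega
          rw [h1]
          simp only [Nat.add_sub_cancel]
          ring

theorem poly_pow_loop_toPoly (out base : List Int) (e : Nat) (ho : out ≠ []) (hb : base ≠ []) :
    toPoly (poly_pow_loop out base e) = toPoly out * (toPoly base) ^ e := by
  induction e using Nat.strong_induction_on generalizing out base with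
  | _ e ih =>
    by_cases he : e = 0
    · subst he; rw [poly_pow_loop]; simp
    · rw [poly_pow_loop_step out base e he]
      by_cases he2 : e / 2 = 0
      · have he1 : e = 1 := by omega
        subst he1
        norm_num
        rw [poly_pow_loop]
        simp [toPoly_mul out base ho hb]
      · rw [if_pos (he2 : e / 2 ≠ 0)]
        by_cases hodd : e % 2 = 1
        · rw [if_pos hodd,
            ih (e/2) (by omega) _ _ (poly_mul_ne_nil _ _ ho hb) (poly_mul_ne_nil _ _ hb hb),
            toPoly_mul _ _ ho hb, toPoly_mul _ _ hb hb]
          rw [← sq, ← pow_mul, mul_assoc, ← pow_succ']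
          have h1 : e = 2 * (e / 2) + 1 := by omega
          conv_rhs => rw [h1]
        · rw [if_neg hodd,
            ih (e/2) (by omega) _ _ ho (poly_mul_ne_nil _ _ hb hb), toPoly_mul _ _ hb hb]
          rw [← sq, ← pow_mul]
          have h1 : e = 2 * (e / 2) := by omega
          conv_rhs => rw [h1]

-- ----- B-side lemmas -----

theorem getD_eq_coeff_toPoly (l : List Int) (m : Nat) : l.getD m 0 = (toPoly l).coeff m :=
  (coeff_toPoly l m).symm

theorem coeff_pow_high (P : Polynomial ℤ) (hP : P.natDegree ≤ 3) (j t : Nat) (ht : 3 * j < t) :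
    (P ^ j).coeff t = 0 := by
  apply Polynomial.coeff_eq_zero_of_natDegree_lt
  calc (P ^ j).natDegree ≤ j * P.natDegree := Polynomial.natDegree_pow_le
    _ ≤ j * 3 := Nat.mul_le_mul_left j hP
    _ < t := by omega

theorem natDegree_toPoly_le (g : List Int) (hg : g.length = 4) : (toPoly g).natDegree ≤ 3 := by
  apply Polynomial.natDegree_le_iff_coeff_eq_zero.mpr
  intro m hm
  rw [coeff_toPoly, List.getD_eq_default _ _ (by omega)]

theorem coeff_mul_window (P Q : Polynomial ℤ) (hP : ∀ d, 4 ≤ d → P.coeff d = 0) (m : Nat) :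
    (Q * P).coeff m = ∑ d ∈ Finset.range 4, (if d ≤ m then P.coeff d * Q.coeff (m - d) else 0) := by
  rw [Polynomial.coeff_mul, Finset.Nat.sum_antidiagonal_eq_sum_range_succ_mk]
  have refl1 : ∑ i ∈ Finset.range (m + 1), Q.coeff i * P.coeff (m - i)
      = ∑ d ∈ Finset.range (m + 1), Q.coeff (m - d) * P.coeff (m - (m - d)) := by
    exact (Finset.sum_range_reflect (fun i => Q.coeff i * P.coeff (m - i)) (m + 1)).symm.trans
      (Finset.sum_congr rfl (fun d hd => by
        simp only [Finset.mem_range] at hd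
        rw [show m + 1 - 1 - d = m - d from by omega]))
  rw [refl1]
  have l1 : ∀ d ∈ Finset.range (m + 1),
      Q.coeff (m - d) * P.coeff (m - (m - d)) = (if d ≤ m then P.coeff d * Q.coeff (m - d) else 0) := by
    intro d hd
    simp only [Finset.mem_range] at hd
    rw [if_pos (by omega), Nat.sub_sub_self (by omega : d ≤ m), mul_comm]
  rw [Finset.sum_congr rfl l1]
  have e1 : ∑ d ∈ Finset.range (m + 1), (if d ≤ m then P.coeff d * Q.coeff (m - d) else 0)
      = ∑ d ∈ Finset.range (max (m + 1) 4), (if d ≤ m then P.coeff d * Q.coeff (m - d) else 0) := by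
    apply Finset.sum_subset (by intro x hx; simp only [Finset.mem_range] at hx ⊢; omega)
    intro x _ hx
    simp only [Finset.mem_range, not_lt] at hx
    rw [if_neg (by omega)]
  have e2 : ∑ d ∈ Finset.range 4, (if d ≤ m then P.coeff d * Q.coeff (m - d) else 0)
      = ∑ d ∈ Finset.range (max (m + 1) 4), (if d ≤ m then P.coeff d * Q.coeff (m - d) else 0) := by
    apply Finset.sum_subset (by intro x hx; simp only [Finset.mem_range] at hx ⊢; omega)
    intro x _ hx
    simp only [Finset.mem_range, not_lt] at hx
    by_cases h1 : x ≤ m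
    · rw [if_pos h1, hP x (by omega), zero_mul]
    · rw [if_neg h1]
  exact e1.trans e2.symm

theorem foldl_guard_sum (f : Nat → Int) (p : Nat → Prop) [DecidablePred p] (l : List Nat) (a : Int) :
    l.foldl (fun acc d => if p d then acc + f d else acc) a
      = a + (l.map (fun d => if p d then f d else 0)).sum := by
  induction l generalizing a with
  | nil => simp
  | cons x xs ih =>
    simp only [List.foldl_cons, List.map_cons, List.sum_cons, ih]
    by_cases h : p x
    · rw [if_pos h, if_pos h]; ring
    · rw [if_neg h, if_neg h]; ring

theorem bRow_eq_sum (g s : List Int) (m : Nat) :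
    bRow g s m = ∑ d ∈ Finset.range 4,
      (if d ≤ m ∧ m - d < s.length then g.getD d 0 * s.getD (m - d) 0 else 0) := by
  rw [bRow, foldl_guard_sum (fun d => g.getD d 0 * s.getD (m - d) 0)
      (fun d => d ≤ m ∧ m - d < s.length) (List.range 4) 0, zero_add]
  rfl

theorem bStep_length (g s : List Int) (M : Nat) :
    (bStep g s M).length = min M (s.length + 2) + 1 := by
  rw [bStep, List.length_map, List.length_range]

theorem bStep_getD (g s : List Int) (M : Nat) (m : Nat) (hm : m < min M (s.length + 2) + 1) :
    (bStep g s M).getD m 0 = bRow g s m := by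
  rw [bStep, List.getD_eq_getElem _ _ (by simpa using hm)]
  simp

theorem bStep_coeff (g s : List Int) (M j : Nat) (hg : g.length = 4)
    (hlen : s.length = min M (3 * j) + 1)
    (hval : ∀ m < s.length, s.getD m 0 = ((toPoly g) ^ j).coeff m)
    (m : Nat) (hm : m < min M (3 * (j + 1)) + 1) :
    (bStep g s M).getD m 0 = ((toPoly g) ^ (j + 1)).coeff m := by
  have hm' : m < min M (s.length + 2) + 1 := by omega
  rw [bStep_getD g s M m hm', bRow_eq_sum]
  rw [pow_succ, coeff_mul_window (toPoly g) ((toPoly g) ^ j)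
    (fun d hd => by rw [coeff_toPoly, List.getD_eq_default _ _ (by omega)]) m]
  apply Finset.sum_congr rfl
  intro d hd
  simp only [Finset.mem_range] at hd
  by_cases h1 : d ≤ m
  · by_cases h2 : m - d < s.length
    · rw [if_pos ⟨h1, h2⟩, if_pos h1, coeff_toPoly, hval (m - d) h2]
    · rw [if_neg (by tauto), if_pos h1]
      have : ((toPoly g) ^ j).coeff (m - d) = 0 := by
        apply coeff_pow_high (toPoly g) (natDegree_toPoly_le g hg)
        omega
      rw [this, mul_zero]
  · rw [if_neg (by tauto), if_neg h1]

theorem bPow_succ (g : List Int) (M k : Nat) :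
    bPow g M (k + 1) = bStep g (bPow g M k) M := by
  rw [bPow, bPow, List.range_succ, List.foldl_append]
  rfl

theorem bPow_spec (g : List Int) (M k : Nat) (hg : g.length = 4) :
    (bPow g M k).length = min M (3 * k) + 1 ∧
      ∀ m < (bPow g M k).length, (bPow g M k).getD m 0 = ((toPoly g) ^ k).coeff m := by
  induction k with
  | zero =>
    refine ⟨by simp [bPow], ?_⟩
    intro m hm
    have hm0 : m = 0 := by simpa [bPow] using hm
    subst hm0
    simp [bPow, pow_zero, Polynomial.coeff_one]
  | succ k ih =>
    rw [bPow_succ]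
    have hlen : (bStep g (bPow g M k) M).length = min M (3 * (k + 1)) + 1 := by
      rw [bStep_length, ih.1]
      omega
    refine ⟨hlen, ?_⟩
    intro m hm
    rw [hlen] at hm
    exact bStep_coeff g (bPow g M k) M k hg ih.1 ih.2 m hm

-- ----- falling and the two final loops -----

theorem falling_zero (n : Int) : falling n 0 = 1 := by
  rw [falling, PySem.List.pyRange_one_eq_nil (by omega)]
  rfl

theorem falling_succ (n : Int) (r : Nat) :
    falling n ((r : Int) + 1) = falling n r * (n - r) := by
  rw [falling, falling, PySem.List.pyRange_one_succ_right (by omega), List.foldl_append]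
  rfl

theorem bSum (n A : Int) (s : List Int) (r : Nat) :
    (List.range r).foldl
      (fun (tf : Int × Int) m =>
        (tf.1 + s.getD m 0 * tf.2 * A ^ (n - (m : Int)).toNat, tf.2 * (n - (m : Int)))) (0, 1)
    = (∑ m ∈ Finset.range r, s.getD m 0 * falling n m * A ^ (n - (m : Int)).toNat, falling n r) := by
  induction r with
  | zero => simp [falling_zero]
  | succ r ih =>
    rw [List.range_succ, List.foldl_append, ih]
    simp only [List.foldl_cons, List.foldl_nil, Finset.sum_range_succ]
    rw [Prod.mk.injEq]
    constructor
    · rfl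
    · rw [← falling_succ]
      push_cast
      ring_nf

theorem aSum (n A : Int) (s : List Int) (r : Nat) :
    (PySem.List.pyRange 0 r 1).foldl
      (fun total m => total + PySem.List.pyGetD s m 0 * falling n m * A ^ (n - m).toNat) 0
    = ∑ m ∈ Finset.range r, s.getD m 0 * falling n m * A ^ (n - (m : Int)).toNat := by
  induction r with
  | zero => simp [PySem.List.pyRange_one_eq_nil]
  | succ r ih =>
    have hcast : ((r : Int) + 1) = ((r + 1 : Nat) : Int) := by push_cast; ring
    rw [← hcast, PySem.List.pyRange_one_succ_right (by omega), List.foldl_append, ih]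
    simp only [List.foldl_cons, List.foldl_nil, Finset.sum_range_succ]
    rw [PySem.List.pyGetD_natCast]

-- ===== VERDICT (by name: the statement is the Claim_ definition above) =====
theorem toPoly_singleton_one : toPoly [1] = 1 := by
  simp [toPoly]

theorem rectfree_3xn_k_spec : Claim_equal_rectfree_3xn_k := by
  intro n k _
  unfold Spec_rectfree_3xn_k
  by_cases hneg : n < 0 ∨ k < 0
  · rw [rectfree_3xn_k, rectfree_3xn_k_alt, if_pos hneg, if_pos hneg]
  · have hn : 0 ≤ n := by omega
    have hk : 0 ≤ k := by omega
    simp only [rectfree_3xn_k, rectfree_3xn_k_alt, if_neg hneg]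
    have hgeq : ([1, 1 + 3 * (k - 1), 3 * (k - 1) * (k - 1), (k - 1) * (k - 1) * (k - 1)] : List Int)
        = [1, 1 + 3 * (k - 1), 3 * ((k - 1) ^ 2), (k - 1) ^ 3] := by
      simp only [List.cons.injEq, and_true, true_and]
      exact ⟨by ring, by ring⟩
    rw [hgeq]
    have hkc : ((k.toNat : Int)) = k := Int.toNat_of_nonneg hk
    have hgnil : ([1, 1 + 3 * (k - 1), 3 * ((k - 1) ^ 2), (k - 1) ^ 3] : List Int) ≠ [] := by simp
    have hlenA : (poly_pow [1, 1 + 3 * (k - 1), 3 * ((k - 1) ^ 2), (k - 1) ^ 3] k).length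
        = 1 + 3 * k.toNat := by
      rw [poly_pow, poly_pow_loop_length _ _ _ (by simp) hgnil]
      rfl
    rw [hlenA]
    have hminA : min ((1 + 3 * k.toNat : Nat) - 1 : Int) n = min (3 * k) n := by
      push_cast
      rw [hkc]
      congr 1
      omega
    rw [hminA]
    have hM0 : 0 ≤ min (3 * k) n := by omega
    have hMc : min (3 * k) n + 1 = (((min (3 * k) n).toNat + 1 : Nat) : Int) := by omega
    rw [hMc, aSum, bSum]
    apply Finset.sum_congr rfl
    intro m hm
    simp only [Finset.mem_range] at hm
    congr 1
    congr 1
    -- A's coefficient equals B's coefficient: both are the m-th coefficient of g^k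
    have hA : (poly_pow [1, 1 + 3 * (k - 1), 3 * ((k - 1) ^ 2), (k - 1) ^ 3] k).getD m 0
        = ((toPoly [1, 1 + 3 * (k - 1), 3 * ((k - 1) ^ 2), (k - 1) ^ 3]) ^ k.toNat).coeff m := by
      rw [getD_eq_coeff_toPoly, poly_pow, poly_pow_loop_toPoly _ _ _ (by simp) hgnil,
        toPoly_singleton_one, one_mul]
    have hB := bPow_spec [1, 1 + 3 * (k - 1), 3 * ((k - 1) ^ 2), (k - 1) ^ 3]
      (min (3 * k) n).toNat k.toNat rfl
    have hMle : (min (3 * k) n).toNat ≤ 3 * k.toNat := by omega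
    have hlenB : (bPow [1, 1 + 3 * (k - 1), 3 * ((k - 1) ^ 2), (k - 1) ^ 3]
        (min (3 * k) n).toNat k.toNat).length = (min (3 * k) n).toNat + 1 := by
      rw [hB.1]
      omega
    rw [hA, hB.2 m (by omega)]
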